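-- pv_equiv track=rewrite | github.com/kizuroy/Programiranje-1 | Domace naloge/Ovire v vrstici.py | pretvori_vrstico
-- ===== SOURCE A (Python) =====
-- def pretvori_vrstico(vrstica):
--     vrstica = "." + vrstica + "."
--     bloki = []
--     for i, znak in enumerate(vrstica):
--         if znak == "#":
--             if vrstica[i - 1] == ".":
--                 zacetek = i
--             if vrstica[i + 1] == ".":
--                 bloki.append((zacetek, i))
--     return bloki
-- ===== SOURCE B (Python) =====
-- def pretvori_vrstico(vrstica):
--     n = len(vrstica)
--     starts = [i + 1 for i in range(n)
--               if vrstica[i] == "#" and (i == 0 or vrstica[i - 1] == ".")]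
--     ends = [i + 1 for i in range(n)
--             if vrstica[i] == "#" and (i == n - 1 or vrstica[i + 1] == ".")]
--     return [([z for z in starts if z <= e][-1], e) for e in ends]
-- ===== Notes on version B (the rewrite author's own statement) =====
-- stated objective: alternative
-- what changed: Replaces the padded sentinel string and single stateful character scan carrying the most recent block start by a declarative two-pass extraction: comprehensions collect the 1-based positions of block starts and block ends directly from the unpadded string, and each end is paired with the last start not after it.
import Mathlib
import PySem

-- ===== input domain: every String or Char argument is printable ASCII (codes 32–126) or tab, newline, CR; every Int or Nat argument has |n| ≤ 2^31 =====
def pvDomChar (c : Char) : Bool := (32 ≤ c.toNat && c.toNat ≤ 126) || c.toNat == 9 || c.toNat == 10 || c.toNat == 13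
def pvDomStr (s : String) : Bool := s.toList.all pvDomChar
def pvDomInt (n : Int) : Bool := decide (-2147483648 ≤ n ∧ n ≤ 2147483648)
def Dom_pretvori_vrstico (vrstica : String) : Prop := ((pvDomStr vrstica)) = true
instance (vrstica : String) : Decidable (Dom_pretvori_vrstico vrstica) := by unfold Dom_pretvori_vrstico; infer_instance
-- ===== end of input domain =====

-- B replaces A's padded-string stateful scan by a declarative two-pass extraction of
-- block-start and block-end positions, pairing each end with the last start not after it
-- (objective: alternative, same result; not claimed faster).

-- ===== PORT A =====
-- the for-loop over enumerate of the dot-padded string: u is the remaining suffix, i the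
-- current index into the padded list t; zac = none models the Python variable zacetek
-- being unassigned (reading it then is a NameError in Python; such inputs are outside Pre_).
def pretvoriAux (t : List Char) (u : List Char) (i : Int) (bloki : List (Int × Int))
    (zac : Option Int) : List (Int × Int) :=
  match u with
  | [] => bloki
  | c :: rest =>
    if c = '#' then
      let zac' := if (PySem.List.pyGet? t (i - 1)).getD ' ' = '.' then some i else zac
      let bloki' := if (PySem.List.pyGet? t (i + 1)).getD ' ' = '.' then
          bloki ++ [(zac'.getD 0, i)] else bloki
      pretvoriAux t rest (i + 1) bloki' zac'
    else pretvoriAux t rest (i + 1) bloki zac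

def pretvori_vrstico (vrstica : String) : List (Int × Int) :=
  let t : List Char := '.' :: vrstica.toList ++ ['.']
  pretvoriAux t t 0 [] none

-- ===== PORT B =====
-- the starts comprehension of Source B: 1-based positions where a hash block begins
def altStarts (l : List Char) : List Int :=
  (List.range l.length).filterMap (fun i =>
    if l.getD i ' ' = '#' ∧ (i = 0 ∨ l.getD (i - 1) ' ' = '.') then some ((i : Int) + 1) else none)

-- the ends comprehension of Source B: 1-based positions where a hash block ends
def altEnds (l : List Char) : List Int :=
  (List.range l.length).filterMap (fun i =>
    if l.getD i ' ' = '#' ∧ (i = l.length - 1 ∨ l.getD (i + 1) ' ' = '.') then some ((i : Int) + 1) else none)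

-- the result comprehension of Source B: pair each end with the last start not after it;
-- indexing -1 into an empty list is a Python IndexError (outside Pre_), modelled by
-- pyGet? returning none, defaulted to 0.
def pretvori_vrstico_alt (vrstica : String) : List (Int × Int) :=
  let l := vrstica.toList
  (altEnds l).map (fun e =>
    ((PySem.List.pyGet? ((altStarts l).filter (fun z => decide (z ≤ e))) (-1)).getD 0, e))

-- ===== PRECONDITION & SPEC =====
-- Pre_ excludes exactly the inputs on which Python A raises NameError (zacetek read
-- before assignment): a hash-block end with no dot-preceded hash-block start at or
-- before it. Python B raises IndexError on exactly the same inputs; A returns on all others.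
def Pre_pretvori_vrstico (vrstica : String) : Prop :=
  ∀ i < vrstica.toList.length,
    (vrstica.toList.getD i ' ' = '#' ∧
      (i = vrstica.toList.length - 1 ∨ vrstica.toList.getD (i + 1) ' ' = '.')) →
    ∃ j ≤ i, vrstica.toList.getD j ' ' = '#' ∧ (j = 0 ∨ vrstica.toList.getD (j - 1) ' ' = '.')
instance (vrstica : String) : Decidable (Pre_pretvori_vrstico vrstica) := by
  unfold Pre_pretvori_vrstico; infer_instance

def pvWitness_pretvori_vrstico : String := "#.##"

def Spec_pretvori_vrstico (vrstica : String) (out : List (Int × Int)) : Prop := out = pretvori_vrstico_alt vrstica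
instance (vrstica : String) (out : List (Int × Int)) : Decidable (Spec_pretvori_vrstico vrstica out) := by unfold Spec_pretvori_vrstico; infer_instance

-- ===== CLAIM (what is proved, stated in full; the proofs are below) =====
def Claim_equal_pretvori_vrstico : Prop := ∀ (vrstica : String), Dom_pretvori_vrstico vrstica → Pre_pretvori_vrstico vrstica → Spec_pretvori_vrstico vrstica (pretvori_vrstico vrstica)

-- ===== LEMMAS AND PROOFS =====

-- structural reference scan: same traversal as A but consulting only local neighbours
def blocksRec (i : Nat) (prev : Char) (u : List Char) (zac : Option Int) : List (Int × Int) :=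
  match u with
  | [] => []
  | c :: rest =>
    let zac' := if c = '#' ∧ prev = '.' then some (i : Int) else zac
    (if c = '#' ∧ rest.headD '.' = '.' then [(zac'.getD 0, (i : Int))] else []) ++
      blocksRec (i + 1) c rest zac'

def startsRec (i : Nat) (prev : Char) (u : List Char) : List Int :=
  match u with
  | [] => []
  | c :: rest => (if c = '#' ∧ prev = '.' then [(i : Int)] else []) ++ startsRec (i + 1) c rest

def endsRec (i : Nat) (u : List Char) : List Int :=
  match u with
  | [] => []
  | c :: rest => (if c = '#' ∧ rest.headD '.' = '.' then [(i : Int)] else []) ++ endsRec (i + 1) rest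

theorem pretvoriAux_eq_blocksRec (u : List Char) : ∀ (pre : List Char)
    (bloki : List (Int × Int)) (zac : Option Int), pre ≠ [] →
    (u ≠ [] → u.getLast? = some '.') →
    pretvoriAux (pre ++ u) u (pre.length : Int) bloki zac =
      bloki ++ blocksRec pre.length (pre.getLastD ' ') u zac := by
  induction u with
  | nil => intro pre bloki zac _ _; simp [pretvoriAux, blocksRec]
  | cons c rest ih =>
    intro pre bloki zac hpre hlast
    rcases List.eq_nil_or_concat pre with rfl | ⟨p', a, rfl⟩
    · exact absurd rfl hpre
    simp only [List.concat_eq_append] at hpre ⊢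
    have hprev : (PySem.List.pyGet? ((p' ++ [a]) ++ c :: rest) (((p' ++ [a]).length : Int) - 1)).getD ' '
        = (p' ++ [a]).getLastD ' ' := by
      have hcast : (((p' ++ [a]).length : Int) - 1) = ((p'.length : Nat) : Int) := by
        simp
      rw [hcast, PySem.List.pyGet?_natCast,
        List.getElem?_append_left (by simp), List.getElem?_concat_length, List.getLastD_concat]
      rfl
    have hnext : (PySem.List.pyGet? ((p' ++ [a]) ++ c :: rest) (((p' ++ [a]).length : Int) + 1)).getD ' '
        = (rest[0]?).getD ' ' := by
      have hcast : ((((p' ++ [a]).length : Nat) : Int) + 1) = (((p' ++ [a]).length + 1 : Nat) : Int) := by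
        push_cast; ring
      rw [hcast, PySem.List.pyGet?_natCast, List.getElem?_append_right (by omega)]
      simp
    cases rest with
    | nil =>
      have hc : c = '.' := by simpa using hlast (by simp)
      subst hc
      simp [pretvoriAux, blocksRec]
    | cons d rest' =>
      have hlast' : (d :: rest') ≠ [] → (d :: rest').getLast? = some '.' := by
        intro _
        have := hlast (by simp)
        simpa using this
      have key : ∀ (B : List (Int × Int)) (Z : Option Int),
          pretvoriAux ((p' ++ [a]) ++ c :: d :: rest') (d :: rest') (((p' ++ [a]).length : Int) + 1) B Z =
            B ++ blocksRec ((p' ++ [a]).length + 1) c (d :: rest') Z := by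
        intro B Z
        have h := ih ((p' ++ [a]) ++ [c]) B Z (by simp) hlast'
        simpa [List.getLastD_concat] using h
      have unfA : ∀ (t : List Char) (i : Int) (b : List (Int × Int)) (z : Option Int),
          pretvoriAux t (c :: d :: rest') i b z =
            if c = '#' then
              pretvoriAux t (d :: rest') (i + 1)
                (if (PySem.List.pyGet? t (i + 1)).getD ' ' = '.' then
                  b ++ [((if (PySem.List.pyGet? t (i - 1)).getD ' ' = '.' then some i else z).getD 0, i)]
                else b)
                (if (PySem.List.pyGet? t (i - 1)).getD ' ' = '.' then some i else z)
            else pretvoriAux t (d :: rest') (i + 1) b z := fun _ _ _ _ => rfl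
      have unfB : ∀ (i : Nat) (prev : Char) (z : Option Int),
          blocksRec i prev (c :: d :: rest') z =
            (if c = '#' ∧ (d :: rest').headD '.' = '.' then
              [((if c = '#' ∧ prev = '.' then some (i : Int) else z).getD 0, (i : Int))] else []) ++
              blocksRec (i + 1) c (d :: rest') (if c = '#' ∧ prev = '.' then some (i : Int) else z) :=
        fun _ _ _ => rfl
      rw [unfA, unfB, hprev, hnext]
      simp only [List.headD_cons, List.getElem?_cons_zero, Option.getD_some]
      split_ifs <;> (try tauto) <;> rw [key] <;> simp [List.append_assoc]

theorem blocksRec_append_dot (u : List Char) : ∀ (i : Nat) (prev : Char) (zac : Option Int),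
    blocksRec i prev (u ++ ['.']) zac = blocksRec i prev u zac := by
  induction u with
  | nil => intro i prev zac; simp [blocksRec]
  | cons c rest ih =>
    intro i prev zac
    have hh : (rest ++ ['.']).headD '.' = rest.headD '.' := by cases rest <;> simp
    simp only [List.cons_append, blocksRec, hh, ih]

theorem portA_eq (vrstica : String) :
    pretvori_vrstico vrstica = blocksRec 1 '.' vrstica.toList none := by
  have h := pretvoriAux_eq_blocksRec (vrstica.toList ++ ['.']) ['.'] [] none (by simp)
      (fun _ => by simp)
  unfold pretvori_vrstico
  have step : pretvoriAux ('.' :: vrstica.toList ++ ['.']) ('.' :: vrstica.toList ++ ['.']) 0 [] none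
      = pretvoriAux ('.' :: vrstica.toList ++ ['.']) (vrstica.toList ++ ['.']) 1 [] none := rfl
  rw [step]
  simpa [blocksRec_append_dot] using h

theorem startsRec_eq (u : List Char) : ∀ (i : Nat) (prev : Char),
    startsRec i prev u = (List.range u.length).filterMap (fun j =>
      if u.getD j ' ' = '#' ∧ ((j = 0 ∧ prev = '.') ∨ (0 < j ∧ u.getD (j - 1) ' ' = '.'))
      then some ((i : Int) + j) else none) := by
  induction u with
  | nil => intro i prev; simp [startsRec]
  | cons c rest ih =>
    intro i prev
    rw [startsRec, List.length_cons, List.range_succ_eq_map, List.filterMap_cons,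
      List.filterMap_map, ih (i + 1) c]
    have h : ∀ j ∈ List.range rest.length,
        (fun j => if rest.getD j ' ' = '#' ∧ ((j = 0 ∧ c = '.') ∨ (0 < j ∧ rest.getD (j - 1) ' ' = '.'))
          then some (((i + 1 : Nat) : Int) + j) else none) j =
        ((fun j => if (c :: rest).getD j ' ' = '#' ∧ ((j = 0 ∧ prev = '.') ∨ (0 < j ∧ (c :: rest).getD (j - 1) ' ' = '.'))
          then some ((i : Int) + j) else none) ∘ Nat.succ) j := by
      intro j _
      rcases j with _ | k <;> (simp; try ring_nf)
    rw [List.filterMap_congr h]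
    rcases eq_or_ne c '#' with hc | hc <;> by_cases hp : prev = '.' <;> simp [hc, hp]

theorem endsRec_eq (u : List Char) : ∀ (i : Nat),
    endsRec i u = (List.range u.length).filterMap (fun j =>
      if u.getD j ' ' = '#' ∧ (j = u.length - 1 ∨ u.getD (j + 1) ' ' = '.')
      then some ((i : Int) + j) else none) := by
  induction u with
  | nil => intro i; simp [endsRec]
  | cons c rest ih =>
    intro i
    rw [endsRec, List.length_cons, List.range_succ_eq_map, List.filterMap_cons,
      List.filterMap_map, ih (i + 1)]
    have h : ∀ j ∈ List.range rest.length,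
        (fun j => if rest.getD j ' ' = '#' ∧ (j = rest.length - 1 ∨ rest.getD (j + 1) ' ' = '.')
          then some (((i + 1 : Nat) : Int) + j) else none) j =
        ((fun j => if (c :: rest).getD j ' ' = '#' ∧ (j = (c :: rest).length - 1 ∨ (c :: rest).getD (j + 1) ' ' = '.')
          then some ((i : Int) + j) else none) ∘ Nat.succ) j := by
      intro j hj
      simp only [List.mem_range] at hj
      have hlen : (j = rest.length - 1) = (j + 1 = rest.length) := propext (by omega)
      simp [hlen]
      ring_nf
    rw [List.filterMap_congr h]
    rcases eq_or_ne c '#' with hc | hc <;> cases rest <;> (simp [hc]; try (split <;> simp_all))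

theorem altStarts_eq (l : List Char) : altStarts l = startsRec 1 '.' l := by
  rw [startsRec_eq, altStarts]
  apply List.filterMap_congr
  intro j _
  rcases j with _ | k <;> (simp; try ring_nf)

theorem altEnds_eq (l : List Char) : altEnds l = endsRec 1 l := by
  rw [endsRec_eq, altEnds]
  apply List.filterMap_congr
  intro j _
  simp
  ring_nf

theorem startsRec_ge (u : List Char) : ∀ (i : Nat) (prev : Char) (z : Int),
    z ∈ startsRec i prev u → (i : Int) ≤ z := by
  induction u with
  | nil => intro i prev z hz; simp [startsRec] at hz
  | cons c rest ih =>
    intro i prev z hz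
    simp only [startsRec, List.mem_append] at hz
    rcases hz with hz | hz
    · split at hz <;> simp at hz; omega
    · have := ih (i + 1) c z hz; push_cast at this ⊢; omega

theorem blocksRec_eq_map (u : List Char) : ∀ (i : Nat) (prev : Char) (zac : Option Int)
    (S : List Int), (∀ z ∈ S, z < (i : Int)) → zac = S.getLast? →
    blocksRec i prev u zac = (endsRec i u).map (fun e =>
      (((S ++ startsRec i prev u).filter (fun z => decide (z ≤ e))).getLast?.getD 0, e)) := by
  induction u with
  | nil => intro i prev zac S _ _; simp [blocksRec, endsRec]
  | cons c rest ih =>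
    intro i prev zac S hS hz
    simp only [blocksRec, endsRec]
    have hstarts : startsRec i prev (c :: rest) =
        (if c = '#' ∧ prev = '.' then [(i : Int)] else []) ++ startsRec (i + 1) c rest := rfl
    rw [hstarts, List.map_append]
    set s0 : List Int := if c = '#' ∧ prev = '.' then [(i : Int)] else [] with hs0
    set zc : Option Int := if c = '#' ∧ prev = '.' then some (i : Int) else zac with hzc
    have hz2 : zc = (S ++ s0).getLast? := by
      rw [hzc, hs0]; split
      · simp
      · simpa using hz
    have hS2 : ∀ z ∈ S ++ s0, z < ((i + 1 : Nat) : Int) := by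
      intro z hzm
      rcases List.mem_append.mp hzm with h | h
      · have := hS z h; push_cast at this ⊢; omega
      · rw [hs0] at h
        split at h
        · simp at h; push_cast; omega
        · simp at h
    have ihh := ih (i + 1) c zc (S ++ s0) hS2 hz2
    rw [List.append_assoc] at ihh
    rw [ihh]
    congr 1
    by_cases hcond : c = '#' ∧ rest.headD '.' = '.'
    · rw [if_pos hcond, if_pos hcond]
      simp only [List.map_cons, List.map_nil]
      have h1 : S.filter (fun z => decide (z ≤ (i : Int))) = S :=
        List.filter_eq_self.mpr (fun z h => by simpa using le_of_lt (hS z h))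
      have h2 : s0.filter (fun z => decide (z ≤ (i : Int))) = s0 := by
        rw [hs0]; split <;> simp
      have h3 : (startsRec (i + 1) c rest).filter (fun z => decide (z ≤ (i : Int))) = [] := by
        apply List.filter_eq_nil_iff.mpr
        intro z h
        have := startsRec_ge rest (i + 1) c z h
        push_cast at this
        simp
        omega
      simp [List.filter_append, h1, h2, h3, ← hz2]
    · rw [if_neg hcond, if_neg hcond]
      simp

-- ===== VERDICT (by name: the statement is the Claim_ definition above) =====
theorem pretvori_vrstico_spec : Claim_equal_pretvori_vrstico := by
  intro vrstica _ _
  unfold Spec_pretvori_vrstico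
  rw [portA_eq, pretvori_vrstico_alt, altStarts_eq, altEnds_eq,
    blocksRec_eq_map _ 1 '.' none [] (by simp) (by simp)]
  simp [PySem.List.pyGet?_neg_one]
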